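-- pv_equiv track=rewrite | github.com/MoKangMedical/medichat-rd | backend/patient_locator_enhanced.py | _check_specialty_match
-- ===== SOURCE A (Python) =====
-- from typing import Dict, List, Optional, Tuple
--
-- def _check_specialty_match(disease_name: str, specialties: List[str]) -> bool:
--     """检查专科匹配"""
--     disease_keywords = disease_name.lower().split()
--
--     for specialty in specialties:
--         specialty_lower = specialty.lower()
--         for keyword in disease_keywords:
--             if keyword in specialty_lower:
--                 return True
--
--     return False
-- ===== SOURCE B (Python) =====
-- from typing import List
--
-- def _check_specialty_match(disease_name: str, specialties: List[str]) -> bool: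
--     """检查专科匹配 — build one lowercased blob, then scan each keyword once."""
--     combined = ' '.join(s.lower() for s in specialties)
--     return any(kw in combined for kw in disease_name.lower().split())
-- ===== Notes on version B (the rewrite author's own statement) =====
-- stated objective: alternative
-- what changed: Replaces the nested per-specialty/per-keyword scan with a single pass that joins all lowercased specialties into one space-separated string and tests each keyword against that one string (safe because split() keywords contain no whitespace, so no keyword can span the separator).
import Mathlib
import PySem

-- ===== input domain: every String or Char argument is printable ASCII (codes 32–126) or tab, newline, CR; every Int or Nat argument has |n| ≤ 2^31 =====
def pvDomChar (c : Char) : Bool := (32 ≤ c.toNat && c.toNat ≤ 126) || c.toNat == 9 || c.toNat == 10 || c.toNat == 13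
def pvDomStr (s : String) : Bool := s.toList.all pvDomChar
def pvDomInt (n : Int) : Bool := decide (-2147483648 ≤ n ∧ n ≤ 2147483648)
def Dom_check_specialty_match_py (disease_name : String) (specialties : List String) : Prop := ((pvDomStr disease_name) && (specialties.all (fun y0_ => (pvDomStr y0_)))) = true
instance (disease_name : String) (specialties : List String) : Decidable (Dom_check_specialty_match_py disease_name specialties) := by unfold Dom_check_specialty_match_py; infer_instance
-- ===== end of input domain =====

-- B replaces A's nested per-specialty/per-keyword scan by joining all lowercased
-- specialties into one space-separated string and testing each keyword against it once
-- (objective: alternative decomposition; split() keywords contain no whitespace, so no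
-- keyword can match across the separator).

-- ===== PORT A =====
def check_specialty_match_py (disease_name : String) (specialties : List String) : Bool :=
  let disease_keywords := PySem.Str.split₀ (PySem.Str.lower disease_name)
  specialties.any (fun specialty =>
    let specialty_lower := PySem.Str.lower specialty
    disease_keywords.any (fun keyword => PySem.Str.isIn keyword specialty_lower))

-- ===== PORT B =====
def check_specialty_match_py_alt (disease_name : String) (specialties : List String) : Bool :=
  let combined := PySem.Str.join " " (specialties.map PySem.Str.lower)
  (PySem.Str.split₀ (PySem.Str.lower disease_name)).any (fun kw => PySem.Str.isIn kw combined)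

-- ===== PRECONDITION & SPEC =====
def Spec_check_specialty_match_py (disease_name : String) (specialties : List String) (out : Bool) : Prop := out = check_specialty_match_py_alt disease_name specialties
instance (disease_name : String) (specialties : List String) (out : Bool) : Decidable (Spec_check_specialty_match_py disease_name specialties out) := by unfold Spec_check_specialty_match_py; infer_instance

-- ===== CLAIM (what is proved, stated in full; the proofs are below) =====
def Claim_equal_check_specialty_match_py : Prop := ∀ (disease_name : String) (specialties : List String), Dom_check_specialty_match_py disease_name specialties → Spec_check_specialty_match_py disease_name specialties (check_specialty_match_py disease_name specialties)

-- ===== LEMMAS AND PROOFS =====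

-- A prefix of u ++ c :: v that avoids c is a prefix of u.
theorem pv_prefix_of_prefix_append_cons {kw u v : List Char} {c : Char}
    (h : kw <+: u ++ c :: v) (hc : c ∉ kw) : kw <+: u := by
  induction u generalizing kw with
  | nil =>
    cases kw with
    | nil => exact List.nil_prefix
    | cons k ks =>
      rw [List.nil_append, List.cons_prefix_cons] at h
      exact absurd (h.1 ▸ List.mem_cons_self) hc
  | cons x u' ih =>
    cases kw with
    | nil => exact List.nil_prefix
    | cons k ks =>
      rw [List.cons_append, List.cons_prefix_cons] at h
      obtain ⟨rfl, hks⟩ := h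
      exact List.cons_prefix_cons.mpr ⟨rfl, ih hks (fun hm => hc (List.mem_cons_of_mem _ hm))⟩

-- A nonempty infix avoiding the separator c lies entirely left or right of it.
theorem pv_infix_append_cons_iff {kw : List Char} (a b : List Char) {c : Char}
    (hne : kw ≠ []) (hc : c ∉ kw) : kw <:+: a ++ c :: b ↔ (kw <:+: a ∨ kw <:+: b) := by
  constructor
  · intro h
    induction a generalizing kw with
    | nil =>
      rw [List.nil_append, List.infix_cons_iff] at h
      rcases h with h | h
      · exact absurd (pv_prefix_of_prefix_append_cons (u := []) (by simpa using h) hc)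
          (by simpa using hne)
      · exact Or.inr h
    | cons x a' ih =>
      rw [List.cons_append, List.infix_cons_iff] at h
      rcases h with h | h
      · exact Or.inl (List.IsPrefix.isInfix (pv_prefix_of_prefix_append_cons (u := x :: a') h hc))
      · rcases ih hne hc h with h' | h'
        · exact Or.inl (List.infix_cons h')
        · exact Or.inr h'
  · rintro (h | h)
    · exact h.trans (List.IsPrefix.isInfix (List.prefix_append a (c :: b)))
    · exact h.trans (List.IsSuffix.isInfix (show b <:+ a ++ c :: b from ⟨a ++ [c], by simp⟩))

-- A nonempty, separator-free word is an infix of the space-joined blob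
-- iff it is an infix of one of the pieces.
theorem pv_infix_join_iff {kw : List Char} (hne : kw ≠ []) (hc : ' ' ∉ kw) :
    ∀ (ps : List (List Char)), kw <:+: PySem.Chars.join [' '] ps ↔ ∃ p ∈ ps, kw <:+: p := by
  intro ps
  induction ps with
  | nil => simp [PySem.Chars.join_nil, List.infix_nil, hne]
  | cons p rest ih =>
    cases rest with
    | nil => simp [PySem.Chars.join_singleton]
    | cons q rest' =>
      rw [PySem.Chars.join_cons_cons]
      rw [List.append_assoc, List.singleton_append, pv_infix_append_cons_iff p _ hne hc]
      rw [ih]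
      simp only [List.mem_cons]
      constructor
      · rintro (h | ⟨r, hr, h⟩)
        · exact ⟨p, Or.inl rfl, h⟩
        · exact ⟨r, Or.inr hr, h⟩
      · rintro ⟨r, (rfl | hr), h⟩
        · exact Or.inl h
        · exact Or.inr ⟨r, hr, h⟩

-- Invariant of split₀'s worker: every produced word is nonempty and whitespace-free.
theorem pv_split₀_go_words :
    ∀ (rest cur : List Char) (accW : List (List Char)),
      (∀ w ∈ accW, w ≠ [] ∧ ∀ ch ∈ w, PySem.Chars.isspace ch = false) →
      (∀ ch ∈ cur, PySem.Chars.isspace ch = false) →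
      ∀ w ∈ PySem.Chars.split₀.go rest cur accW,
        w ≠ [] ∧ ∀ ch ∈ w, PySem.Chars.isspace ch = false := by
  intro rest
  induction rest with
  | nil =>
    intro cur accW hacc hcur w hw
    rw [PySem.Chars.split₀.go.eq_def] at hw
    dsimp only at hw
    by_cases hcur0 : cur = []
    · subst hcur0
      simp only [List.isEmpty_nil, if_true, List.mem_reverse] at hw
      exact hacc w hw
    · have he : cur.isEmpty = false := by simpa using hcur0
      rw [he] at hw
      simp only [Bool.false_eq_true, if_false, List.mem_reverse, List.mem_cons] at hw
      rcases hw with rfl | hw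
      · exact ⟨by simpa using hcur0, fun ch hch => hcur ch (List.mem_reverse.mp hch)⟩
      · exact hacc w hw
  | cons c rest ih =>
    intro cur accW hacc hcur w hw
    rw [PySem.Chars.split₀.go.eq_def] at hw
    dsimp only at hw
    by_cases hsp : PySem.Chars.isspace c = true
    · rw [if_pos hsp] at hw
      by_cases hcur0 : cur = []
      · subst hcur0
        simp only [List.isEmpty_nil, if_true] at hw
        exact ih [] accW hacc (by simp) w hw
      · have he : cur.isEmpty = false := by simpa using hcur0
        rw [he] at hw
        simp only [Bool.false_eq_true, if_false] at hw
        refine ih [] (cur.reverse :: accW) ?_ (by simp) w hw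
        intro w' hw'
        rcases List.mem_cons.mp hw' with rfl | hw'
        · exact ⟨by simpa using hcur0, fun ch hch => hcur ch (List.mem_reverse.mp hch)⟩
        · exact hacc w' hw'
    · rw [if_neg hsp] at hw
      refine ih (c :: cur) accW hacc ?_ w hw
      intro ch hch
      rcases List.mem_cons.mp hch with rfl | hch
      · exact Bool.eq_false_iff.mpr hsp
      · exact hcur ch hch

-- Every word of split₀ is nonempty and contains no whitespace (in particular no ' ').
theorem pv_split₀_words (cs : List Char) :
    ∀ w ∈ PySem.Chars.split₀ cs, w ≠ [] ∧ ∀ ch ∈ w, PySem.Chars.isspace ch = false := by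
  intro w hw
  exact pv_split₀_go_words cs [] [] (by simp) (by simp) w hw

-- ===== VERDICT (by name: the statement is the Claim_ definition above) =====
theorem check_specialty_match_py_spec : Claim_equal_check_specialty_match_py := by
  intro d sp _
  unfold Spec_check_specialty_match_py check_specialty_match_py check_specialty_match_py_alt
  rw [Bool.eq_iff_iff]
  simp only [List.any_eq_true]
  have hkwfacts : ∀ kw ∈ PySem.Str.split₀ (PySem.Str.lower d),
      kw.toList ≠ [] ∧ ' ' ∉ kw.toList := by
    intro kw hkw
    have hmem : kw.toList ∈ PySem.Chars.split₀ (PySem.Str.lower d).toList := by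
      rw [← PySem.Str.split₀_map_toList]
      exact List.mem_map_of_mem hkw
    obtain ⟨h1, h2⟩ := pv_split₀_words _ _ hmem
    refine ⟨h1, fun hsp => ?_⟩
    have := h2 ' ' hsp
    simp [PySem.Chars.isspace] at this
  have hjoin : (PySem.Str.join " " (sp.map PySem.Str.lower)).toList
      = PySem.Chars.join [' '] (sp.map (fun s => (PySem.Str.lower s).toList)) := by
    rw [PySem.Str.toList_join]
    simp [List.map_map, Function.comp_def]
  constructor
  · rintro ⟨s, hs, kw, hkw, h⟩
    refine ⟨kw, hkw, ?_⟩
    obtain ⟨hne, hc⟩ := hkwfacts kw hkw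
    rw [PySem.Str.isIn_iff_infix] at h ⊢
    rw [hjoin, pv_infix_join_iff hne hc]
    exact ⟨(PySem.Str.lower s).toList, List.mem_map_of_mem hs, h⟩
  · rintro ⟨kw, hkw, h⟩
    obtain ⟨hne, hc⟩ := hkwfacts kw hkw
    rw [PySem.Str.isIn_iff_infix, hjoin, pv_infix_join_iff hne hc] at h
    obtain ⟨p, hp, hinf⟩ := h
    obtain ⟨s, hs, rfl⟩ := List.mem_map.mp hp
    exact ⟨s, hs, kw, hkw, (PySem.Str.isIn_iff_infix _ _).mpr hinf⟩
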